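-- pv_equiv track=rewrite | github.com/rahulmisra2010-ctrl/PDF-Manager | backend/services/training_service.py | extract_domain_pattern
-- ===== SOURCE A (Python) =====
-- from collections import Counter
--
-- def extract_domain_pattern(training_emails: list[str]) -> str:
--     """Extract the most common email domain from *training_emails*.
--
--     Returns the domain string without the ``@`` prefix (e.g. ``"example.com"``),
--     or an empty string when no valid email is found.
--
--     Examples
--     --------
--     >>> svc = TrainingService()
--     >>> svc.extract_domain_pattern(["john@example.com", "jane@example.com"])
--     'example.com'
--     """
--     domains: list[str] = []
--     for email in training_emails:
--         email = (email or "").strip()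
--         if "@" in email:
--             domain = email.split("@", 1)[1].strip().lower()
--             if domain and "." in domain:
--                 domains.append(domain)
--
--     if not domains:
--         return ""
--
--     # Most common domain wins; ties broken by alphabetical order for determinism
--     counter = Counter(domains)
--     most_common = counter.most_common()
--     top_count = most_common[0][1]
--     candidates = sorted(d for d, c in most_common if c == top_count)
--     return candidates[0]
-- ===== SOURCE B (Python) =====
-- def extract_domain_pattern(training_emails: list[str]) -> str:
--     """Most common email domain (alphabetical tie-break), by a single
--     max-selection scan over a count dict instead of Counter.most_common + sorted."""
--     counts: dict[str, int] = {}
--     for email in training_emails: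
--         email = (email or "").strip()
--         if "@" in email:
--             domain = email.split("@", 1)[1].strip().lower()
--             if domain and "." in domain:
--                 counts[domain] = counts.get(domain, 0) + 1
--     best_domain = ""
--     best_count = 0
--     for domain, count in counts.items():
--         if count > best_count or (count == best_count and domain < best_domain):
--             best_domain, best_count = domain, count
--     return best_domain
-- ===== Notes on version B (the rewrite author's own statement) =====
-- stated objective: simpler
-- what changed: Builds the count dict directly while scanning the emails and picks the winner by one linear max-selection pass (count desc, name asc tie-break) instead of Counter + most_common() + sorting the tied candidates.
import Mathlib
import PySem

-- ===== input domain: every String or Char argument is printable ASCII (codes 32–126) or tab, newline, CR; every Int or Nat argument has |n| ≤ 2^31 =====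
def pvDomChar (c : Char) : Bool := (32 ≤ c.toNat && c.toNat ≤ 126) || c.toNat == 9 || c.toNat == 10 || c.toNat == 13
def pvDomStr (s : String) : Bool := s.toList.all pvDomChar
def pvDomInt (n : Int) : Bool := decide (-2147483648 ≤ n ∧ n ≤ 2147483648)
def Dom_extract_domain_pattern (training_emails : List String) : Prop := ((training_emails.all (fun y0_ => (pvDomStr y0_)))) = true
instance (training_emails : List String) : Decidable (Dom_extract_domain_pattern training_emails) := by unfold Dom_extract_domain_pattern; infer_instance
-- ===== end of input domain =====

-- B counts domains directly in the email loop and selects the winner by one linear max-selection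
-- scan (count desc, name asc) instead of Counter + most_common() + sorted(); return value only.

-- shared helper: the per-email domain extraction, textually identical in both Pythons:
-- e = (email or "").strip(); if "@" in e: d = e.split("@",1)[1].strip().lower(); keep d if d and "." in d
-- (the .getD fallbacks are unreachable: under the "@" guard, split("@", 1) has exactly two parts)
def domainOf? (email : String) : Option String :=
  let e := PySem.Str.strip (if email == "" then "" else email)
  if PySem.Str.isIn "@" e then
    let d := PySem.Str.lower (PySem.Str.strip (((PySem.Str.splitMax? e "@" 1).getD []).getD 1 ""))
    if (!(d == "") && PySem.Str.isIn "." d) then some d else none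
  else none

-- ===== PORT A =====
def extract_domain_pattern (training_emails : List String) : String :=
  let domains : List String := training_emails.foldl (fun ds email =>
    match domainOf? email with
    | some d => ds ++ [d]
    | none => ds) []
  if domains = [] then ""
  else
    let counter := PySem.Dict.counter domains
    let most_common := PySem.List.sorted counter.items (fun kv => kv.2) true
    let top_count := (most_common.headD ("", 0)).2
    let candidates := PySem.List.sorted ((most_common.filter (fun kv => kv.2 == top_count)).map (fun kv => kv.1)) (fun d => d) false
    candidates.headD ""

-- ===== PORT B =====
def extract_domain_pattern_alt (training_emails : List String) : String :=
  let counts : PySem.Dict String Int := training_emails.foldl (fun d email =>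
    match domainOf? email with
    | some domain => d.insert domain (d.getD domain 0 + 1)
    | none => d) PySem.Dict.empty
  let best := counts.items.foldl (fun (best : String × Int) kv =>
    if kv.2 > best.2 ∨ (kv.2 = best.2 ∧ kv.1 < best.1) then kv else best) ("", 0)
  best.1

-- ===== PRECONDITION & SPEC =====
def Spec_extract_domain_pattern (training_emails : List String) (out : String) : Prop := out = extract_domain_pattern_alt training_emails
instance (training_emails : List String) (out : String) : Decidable (Spec_extract_domain_pattern training_emails out) := by unfold Spec_extract_domain_pattern; infer_instance

-- ===== CLAIM (what is proved, stated in full; the proofs are below) =====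
def Claim_equal_extract_domain_pattern : Prop := ∀ (training_emails : List String), Dom_extract_domain_pattern training_emails → Spec_extract_domain_pattern training_emails (extract_domain_pattern training_emails)

-- ===== LEMMAS AND PROOFS =====

-- B's selection order: kv beats best iff higher count, or equal count and smaller name
def pvBetter (x y : String × Int) : Prop := x.2 > y.2 ∨ (x.2 = y.2 ∧ x.1 < y.1)

def pvStep (best kv : String × Int) : String × Int :=
  if kv.2 > best.2 ∨ (kv.2 = best.2 ∧ kv.1 < best.1) then kv else best

lemma pvStep_pos {best kv : String × Int} (h : pvBetter kv best) : pvStep best kv = kv := by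
  unfold pvBetter at h; unfold pvStep; rw [if_pos h]

lemma pvStep_neg {best kv : String × Int} (h : ¬ pvBetter kv best) : pvStep best kv = best := by
  unfold pvBetter at h; unfold pvStep; rw [if_neg h]

lemma pvBetter_irrefl (x : String × Int) : ¬ pvBetter x x := by
  unfold pvBetter; simp

lemma pvBetter_trans {x y z : String × Int} (h1 : pvBetter x y) (h2 : pvBetter y z) : pvBetter x z := by
  unfold pvBetter at *
  rcases h1 with h1 | ⟨h1, h1'⟩ <;> rcases h2 with h2 | ⟨h2, h2'⟩
  · exact Or.inl (lt_trans h2 h1)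
  · exact Or.inl (h2 ▸ h1)
  · exact Or.inl (h1 ▸ h2)
  · exact Or.inr ⟨h1.trans h2, lt_trans h1' h2'⟩

lemma pvBetter_trans' {x y z : String × Int} (h1 : ¬ pvBetter y x) (h2 : pvBetter y z) : pvBetter x z := by
  unfold pvBetter at *
  have hle : y.2 ≤ x.2 := le_of_not_gt (fun h => h1 (Or.inl h))
  rcases h2 with h2 | ⟨h2, h2'⟩
  · exact Or.inl (lt_of_lt_of_le h2 hle)
  · rcases lt_or_eq_of_le hle with h | h
    · exact Or.inl (h2 ▸ h)
    · have hxy : x.1 ≤ y.1 := le_of_not_gt (fun hgt => h1 (Or.inr ⟨h, hgt⟩))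
      exact Or.inr ⟨h ▸ h2, lt_of_le_of_lt hxy h2'⟩

lemma pvBetter_total {x y : String × Int} (h : x.1 ≠ y.1) : pvBetter x y ∨ pvBetter y x := by
  unfold pvBetter
  rcases lt_trichotomy x.2 y.2 with h2 | h2 | h2
  · exact Or.inr (Or.inl h2)
  · rcases lt_or_gt_of_ne h with h1 | h1
    · exact Or.inl (Or.inr ⟨h2, h1⟩)
    · exact Or.inr (Or.inr ⟨h2.symm, h1⟩)
  · exact Or.inl (Or.inl h2)

lemma sel_mem : ∀ (l : List (String × Int)) (init : String × Int),
    l.foldl pvStep init ∈ init :: l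
  | [], init => by simp
  | y :: t, init => by
      simp only [List.foldl_cons]
      have h := sel_mem t (pvStep init y)
      have hs : pvStep init y = y ∨ pvStep init y = init := by
        unfold pvStep; split; exacts [Or.inl rfl, Or.inr rfl]
      rcases List.mem_cons.mp h with h | h
      · rw [h]; rcases hs with h2 | h2 <;> rw [h2] <;> simp
      · simp [h]

lemma sel_not_better : ∀ (l : List (String × Int)) (init x : String × Int),
    x ∈ init :: l → ¬ pvBetter x (l.foldl pvStep init)
  | [], init, x, hx => by
      simp at hx; subst hx; exact pvBetter_irrefl _
  | y :: t, init, x, hx => by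
      simp only [List.foldl_cons]
      by_cases hb : pvBetter y init
      · rw [pvStep_pos hb]
        rcases List.mem_cons.mp hx with rfl | hx'
        · intro hc; exact sel_not_better t y y (List.mem_cons_self ..) (pvBetter_trans hb hc)
        · rcases List.mem_cons.mp hx' with rfl | hx''
          · exact sel_not_better t x x (List.mem_cons_self ..)
          · exact sel_not_better t y x (List.mem_cons.mpr (Or.inr hx''))
      · rw [pvStep_neg hb]
        rcases List.mem_cons.mp hx with rfl | hx'
        · exact sel_not_better t x x (List.mem_cons_self ..)
        · rcases List.mem_cons.mp hx' with rfl | hx''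
          · intro hc; exact sel_not_better t init init (List.mem_cons_self ..) (pvBetter_trans' hb hc)
          · exact sel_not_better t init x (List.mem_cons.mpr (Or.inr hx''))

-- A's domain-collecting loop is filterMap domainOf?
lemma fusionA : ∀ (es : List String) (acc : List String),
    es.foldl (fun ds email =>
      match domainOf? email with
      | some d => ds ++ [d]
      | none => ds) acc
      = acc ++ es.filterMap domainOf? := by
  intro es
  induction es with
  | nil => intro acc; simp
  | cons e t ih =>
    intro acc
    simp only [List.foldl_cons, List.filterMap_cons]
    cases h : domainOf? e with
    | none => simp [ih]
    | some d => simp [ih, List.append_assoc]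

-- B's counting loop over the emails is the counting loop over the extracted domains
lemma fusionB : ∀ (es : List String) (d : PySem.Dict String Int),
    es.foldl (fun d email =>
      match domainOf? email with
      | some domain => d.insert domain (d.getD domain 0 + 1)
      | none => d) d
      = (es.filterMap domainOf?).foldl (fun d x => d.insert x (d.getD x 0 + 1)) d := by
  intro es
  induction es with
  | nil => intro d; simp
  | cons e t ih =>
    intro d
    simp only [List.foldl_cons, List.filterMap_cons]
    cases h : domainOf? e with
    | none => simp [ih]
    | some x => simp [ih]

-- counts[x] = counts.get(x, 0) + 1 is exactly Counter's update, so B's dict is Counter(domains)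
lemma countsEq (l : List String) :
    l.foldl (fun d x => d.insert x (d.getD x 0 + 1)) PySem.Dict.empty = PySem.Dict.counter l := by
  have h : (fun (d : PySem.Dict String Int) (x : String) => d.modify x 0 (· + 1))
      = fun d x => d.insert x (d.getD x 0 + 1) := by
    funext d x; rfl
  rw [PySem.Dict.counter_eq_foldl, h]

-- the heart: on a nonempty domain list, A's most_common/top/sorted-candidates head
-- equals B's single max-selection scan over the counter items
lemma core (l : List String) (hl : l ≠ []) :
    (PySem.List.sorted
      (((PySem.List.sorted (PySem.Dict.counter l).items (fun kv => kv.2) true).filter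
          (fun kv => kv.2 == ((PySem.List.sorted (PySem.Dict.counter l).items (fun kv => kv.2) true).headD ("", 0)).2)).map
        (fun kv => kv.1)) (fun d => d) false).headD ""
    = ((PySem.Dict.counter l).items.foldl pvStep ("", 0)).1 := by
  have hitems : (PySem.Dict.counter l).items = (PySem.Set.ofList l).map (fun k => (k, (l.count k : Int))) :=
    PySem.Dict.items_counter l
  set items := (PySem.Dict.counter l).items with hitems_def
  -- every item is (k, count k) keyed by its own first component
  have hshape : ∀ x ∈ items, x = (x.1, (l.count x.1 : Int)) := by
    intro x hx
    rw [hitems] at hx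
    obtain ⟨k, hk, rfl⟩ := List.mem_map.mp hx
    rfl
  have hpos : ∀ x ∈ items, 1 ≤ x.2 := by
    intro x hx
    rw [hitems] at hx
    obtain ⟨k, hk, rfl⟩ := List.mem_map.mp hx
    have hmem : k ∈ l := (PySem.Set.mem_ofList ..).mp hk
    have hc : 0 < l.count k := List.count_pos_iff.mpr hmem
    show (1 : Int) ≤ (l.count k : Int)
    exact_mod_cast hc
  have hitems_ne : items ≠ [] := by
    rw [hitems]
    obtain ⟨a, ha⟩ := List.exists_mem_of_ne_nil l hl
    exact List.ne_nil_of_mem (List.mem_map.mpr ⟨a, (PySem.Set.mem_ofList ..).mpr ha, rfl⟩)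
  -- A side
  set mc := PySem.List.sorted items (fun kv => kv.2) true with hmc
  have hperm : mc.Perm items := PySem.List.sorted_perm ..
  have hmc_ne : mc ≠ [] := by
    intro h
    exact hitems_ne ((PySem.List.sorted_eq_nil_iff ..).mp h)
  obtain ⟨m, t, hmt⟩ := List.exists_cons_of_ne_nil hmc_ne
  have htop : ∀ y ∈ items, y.2 ≤ m.2 := by
    have h := PySem.List.key_head_sorted_rev_ge (xs := items) (fun kv => kv.2) hmt
    simpa using h
  rw [hmt]
  simp only [List.headD_cons]
  set flt := (m :: t).filter (fun kv => kv.2 == m.2) with hflt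
  have hm_mem_flt : m ∈ flt := by
    rw [hflt]
    exact List.mem_filter.mpr ⟨List.mem_cons_self .., by simp⟩
  set cands := PySem.List.sorted (flt.map (fun kv => kv.1)) (fun d => d) false with hcands
  have hcands_ne : cands ≠ [] := by
    intro h
    have h2 : flt.map (fun kv => kv.1) = [] := (PySem.List.sorted_eq_nil_iff ..).mp h
    rw [List.map_eq_nil_iff] at h2
    rw [h2] at hm_mem_flt
    exact absurd hm_mem_flt (List.not_mem_nil)
  obtain ⟨a, ct, hct⟩ := List.exists_cons_of_ne_nil hcands_ne
  have hmin : ∀ y ∈ flt.map (fun kv => kv.1), a ≤ y := by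
    have h := PySem.List.key_head_sorted_le (xs := flt.map (fun kv => kv.1)) (fun d => d) hct
    simpa using h
  -- a is the name of an item of count m.2
  have ha_mem : ∃ kv ∈ items, kv.1 = a ∧ kv.2 = m.2 := by
    have h1 : a ∈ cands := by rw [hct]; exact List.mem_cons_self ..
    have h2 : a ∈ flt.map (fun kv => kv.1) := (PySem.List.mem_sorted ..).mp h1
    obtain ⟨kv, hkv, hkva⟩ := List.mem_map.mp h2
    rw [hflt] at hkv
    have hkv' := List.mem_filter.mp hkv
    refine ⟨kv, ?_, hkva, by simpa using hkv'.2⟩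
    rw [← hmt] at hkv'
    exact hperm.mem_iff.mp hkv'.1
  obtain ⟨kv, hkv_mem, hkv1, hkv2⟩ := ha_mem
  -- (a, m.2) is maximal among items
  have hA_max : ∀ x ∈ items, ¬ pvBetter x kv := by
    intro x hx hbx
    unfold pvBetter at hbx
    rw [hkv2] at hbx
    rcases hbx with hbx | ⟨hbx, hbx'⟩
    · exact absurd (htop x hx) (not_le.mpr hbx)
    · -- x has top count, so its name is in flt.map fst, hence a ≤ x.1 < a
      have hx_mc : x ∈ (m :: t) := by rw [← hmt]; exact hperm.mem_iff.mpr hx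
      have hx_flt : x ∈ flt := by
        rw [hflt]
        exact List.mem_filter.mpr ⟨hx_mc, by simp [hbx]⟩
      have hax : a ≤ x.1 := hmin x.1 (List.mem_map.mpr ⟨x, hx_flt, rfl⟩)
      rw [hkv1] at hbx'
      exact absurd hax (not_le.mpr hbx')
  -- B side
  set r := items.foldl pvStep ("", 0) with hr
  have hr_mem : r ∈ ("", 0) :: items := sel_mem ..
  have hr_max : ∀ x ∈ ("", 0) :: items, ¬ pvBetter x r := fun x hx => sel_not_better items ("", 0) x hx
  have hr_in_items : r ∈ items := by
    rcases List.mem_cons.mp hr_mem with h | h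
    · exfalso
      obtain ⟨w, hw⟩ := List.exists_mem_of_ne_nil items hitems_ne
      apply hr_max w (List.mem_cons.mpr (Or.inr hw))
      rw [h]
      exact Or.inl (by simpa using lt_of_lt_of_le Int.zero_lt_one (hpos w hw))
    · exact h
  -- uniqueness: r = kv, hence the heads agree
  have hrkv : r = kv := by
    by_contra hne
    have hne1 : r.1 ≠ kv.1 := by
      intro h1
      apply hne
      rw [hshape r hr_in_items, hshape kv hkv_mem, h1]
    rcases pvBetter_total hne1 with h | h
    · exact hA_max r hr_in_items h
    · exact hr_max kv (List.mem_cons.mpr (Or.inr hkv_mem)) h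
  rw [hct]
  simp only [List.headD_cons]
  rw [hrkv, hkv1]

lemma main_eq (es : List String) :
    extract_domain_pattern es = extract_domain_pattern_alt es := by
  unfold extract_domain_pattern extract_domain_pattern_alt
  rw [fusionA, fusionB, countsEq]
  simp only [List.nil_append]
  set l := es.filterMap domainOf? with hldef
  by_cases hl : l = []
  · rw [if_pos hl, hl]
    rfl
  · rw [if_neg hl]
    have hstep : (fun (best : String × Int) kv =>
        if kv.2 > best.2 ∨ (kv.2 = best.2 ∧ kv.1 < best.1) then kv else best) = pvStep := rfl
    rw [hstep]
    exact core l hl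

-- ===== VERDICT (by name: the statement is the Claim_ definition above) =====
theorem extract_domain_pattern_spec : Claim_equal_extract_domain_pattern := by
  intro es _
  exact main_eq es
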